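-- pv_equiv track=rewrite | github.com/cedriccaille/CSCI_1133 | 8thWeek/quiz08.py | common_start
-- ===== SOURCE A (Python) =====
-- def common_start(word_list):
--     out = []
--     finallst = []
--     for i in range(len(word_list)):
--         for j in range(i+1, len(word_list)):
--             if word_list[i][0] == word_list[j][0]:
--                 out.append(word_list[i])
--                 out.append(word_list[j])
--     for k in range(len(out)):
--         if out[k] not in finallst:
--             finallst.append(out[k])
--     return finallst
-- ===== SOURCE B (Python) =====
-- def common_start(word_list):
--     res = []
--     seen = set()   # words already emitted
--     done = set()   # first letters whose whole group was already emitted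
--     for i, w in enumerate(word_list):
--         c = w[0]
--         if c not in done:
--             done.add(c)
--             group = [w] + [u for u in word_list[i+1:] if u[0] == c]
--             if len(group) > 1:
--                 for u in group:
--                     if u not in seen:
--                         seen.add(u)
--                         res.append(u)
--     return res
-- ===== Notes on version B (the rewrite author's own statement) =====
-- stated objective: faster
-- what changed: A emits every matching ordered pair into a list (O(n^2) entries) and then deduplicates it with a quadratic membership scan; B makes one pass, handling each first letter only once (a 'done' set), collecting that letter's whole group in a single filter and deduplicating with a hash set.
-- outside the precondition, e.g. on common_start(['']): A returns [], B raises IndexError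
import Mathlib
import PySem

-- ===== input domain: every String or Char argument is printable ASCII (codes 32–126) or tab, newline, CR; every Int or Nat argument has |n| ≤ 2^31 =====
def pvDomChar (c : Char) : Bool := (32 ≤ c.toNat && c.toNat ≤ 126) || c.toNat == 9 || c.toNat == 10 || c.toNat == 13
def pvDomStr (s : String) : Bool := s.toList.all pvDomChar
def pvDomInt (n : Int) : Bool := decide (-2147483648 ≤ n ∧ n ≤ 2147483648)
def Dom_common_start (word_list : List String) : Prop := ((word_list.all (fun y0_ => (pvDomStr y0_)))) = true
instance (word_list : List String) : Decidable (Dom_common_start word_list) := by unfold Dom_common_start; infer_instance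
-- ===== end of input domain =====

-- B replaces A's cubic pair-emission plus quadratic dedup scan by one pass that handles each
-- first letter once (a 'done' set), collecting its whole group with a set-based dedup (objective: faster).

-- ===== PORT A =====
def common_start (word_list : List String) : List String :=
  let n : Int := (word_list.length : Int)
  let out : List String :=
    (PySem.List.pyRange 0 n 1).foldl (fun out i =>
      (PySem.List.pyRange (i+1) n 1).foldl (fun out j =>
        if PySem.Str.pyGet? (PySem.List.pyGetD word_list i "") 0
            = PySem.Str.pyGet? (PySem.List.pyGetD word_list j "") 0 then
          out ++ [PySem.List.pyGetD word_list i ""] ++ [PySem.List.pyGetD word_list j ""]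
        else out) out) []
  (PySem.List.pyRange 0 ((out.length : Int)) 1).foldl (fun finallst k =>
    if PySem.List.pyGetD out k "" ∈ finallst then finallst
    else finallst ++ [PySem.List.pyGetD out k ""]) []

-- ===== PORT B =====
def common_start_alt (word_list : List String) : List String :=
  let st := (PySem.List.enumerate word_list 0).foldl
    (fun (st : List String × PySem.Set String × PySem.Set (Option Char)) p =>
      let res := st.1
      let seen := st.2.1
      let done := st.2.2
      let w := p.2
      let c := PySem.Str.pyGet? w 0
      if PySem.Set.contains done c then st
      else
        let done' := PySem.Set.add done c
        let group := w :: (PySem.List.slice word_list (some (p.1 + 1)) none).filter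
            (fun u => PySem.Str.pyGet? u 0 == c)
        if 1 < group.length then
          let rs := group.foldl (fun (rs : List String × PySem.Set String) u =>
            if PySem.Set.contains rs.2 u then rs
            else (rs.1 ++ [u], PySem.Set.add rs.2 u)) (res, seen)
          (rs.1, rs.2, done')
        else (res, seen, done'))
    ([], PySem.Set.empty, PySem.Set.empty)
  st.1

-- ===== PRECONDITION & SPEC =====
-- Pre_ excludes lists containing an empty string: there Python A raises IndexError on word[0] (B too).
def Pre_common_start (word_list : List String) : Prop := ∀ w ∈ word_list, w ≠ ""
instance (word_list : List String) : Decidable (Pre_common_start word_list) := by unfold Pre_common_start; infer_instance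
def pvWitness_common_start : List String := (["apple", "ant", "bee", "cat", "cab"])
def Spec_common_start (word_list : List String) (out : List String) : Prop := out = common_start_alt word_list
instance (word_list : List String) (out : List String) : Decidable (Spec_common_start word_list out) := by unfold Spec_common_start; infer_instance

-- ===== CLAIM (what is proved, stated in full; the proofs are below) =====
def Claim_equal_common_start : Prop := ∀ (word_list : List String), Dom_common_start word_list → Pre_common_start word_list → Spec_common_start word_list (common_start word_list)

-- ===== LEMMAS AND PROOFS =====

-- first character of a word, as the ports compute it (none on "")
def pvHd (w : String) : Option Char := w.toList[0]?

-- ordered dedup step / fold ('if x not in acc: acc.append(x)')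
def pvDstep (acc : List String) (x : String) : List String := if x ∈ acc then acc else acc ++ [x]
def pvDd (acc l : List String) : List String := l.foldl pvDstep acc

-- A's pair-emission list, structurally
def pvPairs : List String → List String
  | [] => []
  | w :: t => ((t.filter (fun u => decide (pvHd w = pvHd u))).flatMap (fun u => [w, u])) ++ pvPairs t

-- B's loop, structurally (res carries the emitted words; done the handled first letters)
def pvBS : List String → List String → List (Option Char) → List String
  | [], res, _ => res
  | w :: t, res, done =>
      if pvHd w ∈ done then pvBS t res done
      else if t.filter (fun u => decide (pvHd w = pvHd u)) = [] then
        pvBS t res (done ++ [pvHd w])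
      else
        pvBS t (pvDd res (w :: t.filter (fun u => decide (pvHd w = pvHd u)))) (done ++ [pvHd w])

theorem pvDd_append (acc l₁ l₂ : List String) : pvDd acc (l₁ ++ l₂) = pvDd (pvDd acc l₁) l₂ := by
  simp [pvDd, List.foldl_append]

theorem mem_pvDstep (acc : List String) (x y : String) (h : y ∈ acc ∨ y = x) : y ∈ pvDstep acc x := by
  unfold pvDstep; rcases h with h | rfl <;> split <;> simp_all

theorem mem_pvDd (acc l : List String) (x : String) (h : x ∈ acc ∨ x ∈ l) : x ∈ pvDd acc l := by
  induction l generalizing acc with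
  | nil => simpa [pvDd] using h
  | cons a t ih =>
    simp only [pvDd, List.foldl_cons] at *
    rcases h with h | h
    · exact ih _ (Or.inl (mem_pvDstep _ _ _ (Or.inl h)))
    · rcases List.mem_cons.1 h with rfl | h
      · exact ih _ (Or.inl (mem_pvDstep _ _ _ (Or.inr rfl)))
      · exact ih _ (Or.inr h)

theorem pvDd_of_subset (acc l : List String) (h : ∀ x ∈ l, x ∈ acc) : pvDd acc l = acc := by
  induction l generalizing acc with
  | nil => rfl
  | cons a t ih =>
    have ha : a ∈ acc := h a (by simp)
    simp only [pvDd, List.foldl_cons]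
    have : pvDstep acc a = acc := by simp [pvDstep, ha]
    rw [this]
    exact ih acc (fun x hx => h x (by simp [hx]))

theorem pvDd_flatMap_pair (w : String) (ms acc : List String) (hw : w ∈ acc) :
    pvDd acc (ms.flatMap (fun u => [w, u])) = pvDd acc ms := by
  induction ms generalizing acc with
  | nil => rfl
  | cons m t ih =>
    simp only [List.flatMap_cons, pvDd, List.foldl_cons, List.foldl_append] at *
    have hstep : pvDstep acc w = acc := by simp [pvDstep, hw]
    rw [hstep]
    exact ih _ (mem_pvDstep _ _ _ (Or.inl hw))

theorem pvDd_blk (w m : String) (ms acc : List String) :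
    pvDd acc ((m :: ms).flatMap (fun u => [w, u])) = pvDd acc (w :: m :: ms) := by
  simp only [List.flatMap_cons, pvDd, List.foldl_cons, List.foldl_append]
  show pvDd (pvDstep (pvDstep acc w) m) (ms.flatMap (fun u => [w, u])) = pvDd (pvDstep (pvDstep acc w) m) ms
  exact pvDd_flatMap_pair w ms _ (mem_pvDstep _ _ _ (Or.inl (mem_pvDstep _ _ _ (Or.inr rfl))))

-- core: A's dedup of the pair list equals B's loop, under the 'done' invariant
theorem pv_core (t : List String) : ∀ (res : List String) (done : List (Option Char)),
    (∀ c ∈ done, ∀ x ∈ t, pvHd x = c → x ∈ res) →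
    pvDd res (pvPairs t) = pvBS t res done := by
  induction t with
  | nil => intro res done _; rfl
  | cons w t ih =>
    intro res done hinv
    rw [pvPairs, pvDd_append, pvBS]
    by_cases hw : pvHd w ∈ done
    · -- group already handled: every element of the block is already in res
      have hsub : ∀ x ∈ (t.filter (fun u => decide (pvHd w = pvHd u))).flatMap (fun u => [w, u]), x ∈ res := by
        intro x hx
        simp only [List.mem_flatMap, List.mem_filter, List.mem_cons, decide_eq_true_eq] at hx
        obtain ⟨u, ⟨hu, hequ⟩, hx⟩ := hx
        rcases hx with rfl | hx
        · exact hinv _ hw x (by simp) rfl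
        · rcases hx with rfl | hx
          · exact hinv _ hw x (by simp [hu]) hequ.symm
          · simp at hx
      rw [pvDd_of_subset _ _ hsub, if_pos hw]
      exact ih res done (fun c hc x hx he => hinv c hc x (by simp [hx]) he)
    · rw [if_neg hw]
      rcases hms : t.filter (fun u => decide (pvHd w = pvHd u)) with _ | ⟨m, ms⟩
      · -- no partner: nothing emitted, letter marked done (vacuously satisfied)
        simp only [List.flatMap_nil]
        rw [show pvDd res [] = res from rfl]
        refine ih res (done ++ [pvHd w]) ?_
        intro c hc x hx he
        rcases List.mem_append.1 hc with hc | hc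
        · exact hinv c hc x (by simp [hx]) he
        · simp only [List.mem_singleton] at hc; subst hc
          exfalso
          have : x ∈ t.filter (fun u => decide (pvHd w = pvHd u)) := by
            simp [List.mem_filter, hx, he.symm]
          rw [hms] at this; simp at this
      · rw [pvDd_blk]
        rw [if_neg (by simp : ¬ (m :: ms : List String) = [])]
        refine ih (pvDd res (w :: m :: ms)) (done ++ [pvHd w]) ?_
        intro c hc x hx he
        rcases List.mem_append.1 hc with hc | hc
        · exact mem_pvDd _ _ _ (Or.inl (hinv c hc x (by simp [hx]) he))
        · simp only [List.mem_singleton] at hc; subst hc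
          have : x ∈ t.filter (fun u => decide (pvHd w = pvHd u)) := by
            simp [List.mem_filter, hx, he.symm]
          rw [hms] at this
          exact mem_pvDd _ _ _ (Or.inr (by simpa using Or.inr this))


-- ---- characterization of port A ----

theorem pvHd_eq (u : String) : PySem.Str.pyGet? u 0 = pvHd u := by
  simpa [pvHd] using PySem.Str.pyGet?_natCast u 0

-- one block of A's pair emission, in index form
def pvBlkI (ws : List String) (i : Int) : List String :=
  ((ws.drop (i+1).toNat).filter
      (fun u => decide (PySem.Str.pyGet? (PySem.List.pyGetD ws i "") 0 = PySem.Str.pyGet? u 0))).flatMap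
    (fun u => [PySem.List.pyGetD ws i "", u])

-- the same block, natural-number form
def pvBlkN (ws : List String) (k : Nat) : List String :=
  ((ws.drop (k+1)).filter (fun u => decide (pvHd (ws.getD k "") = pvHd u))).flatMap
    (fun u => [ws.getD k "", u])

theorem pvBlkI_cast (ws : List String) (k : Nat) : pvBlkI ws (k : Int) = pvBlkN ws k := by
  have h1 : ((k : Int) + 1).toNat = k + 1 := by omega
  simp only [pvBlkI, pvBlkN, h1, PySem.List.pyGetD_natCast, pvHd_eq]

theorem pvOut_eq (ws : List String) :
    (PySem.List.pyRange 0 ((ws.length : Int)) 1).foldl (fun out i =>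
      (PySem.List.pyRange (i+1) ((ws.length : Int)) 1).foldl (fun out j =>
        if PySem.Str.pyGet? (PySem.List.pyGetD ws i "") 0
            = PySem.Str.pyGet? (PySem.List.pyGetD ws j "") 0 then
          out ++ [PySem.List.pyGetD ws i ""] ++ [PySem.List.pyGetD ws j ""]
        else out) out) []
    = (List.range ws.length).flatMap (pvBlkN ws) := by
  rw [PySem.List.foldl_congr_mem _ _ (fun out i => out ++ pvBlkI ws i) _ ?_]
  · rw [PySem.List.foldl_append_eq_flatMap, List.nil_append, PySem.List.pyRange_zero_natCast,
      List.flatMap_map]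
    exact List.flatMap_congr (fun k _ => pvBlkI_cast ws k)
  · intro acc i hi
    have h0 : (0:Int) ≤ i + 1 := by
      have := (PySem.List.mem_pyRange_one.1 hi).1; omega
    rw [PySem.List.foldl_pyRange_pyGetD' ws ""
        (fun out u => if PySem.Str.pyGet? (PySem.List.pyGetD ws i "") 0 = PySem.Str.pyGet? u 0
          then out ++ [PySem.List.pyGetD ws i ""] ++ [u] else out) acc h0]
    rw [PySem.List.foldl_ite_eq_foldl_filter
        (fun u => PySem.Str.pyGet? (PySem.List.pyGetD ws i "") 0 = PySem.Str.pyGet? u 0)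
        (fun out u => out ++ [PySem.List.pyGetD ws i ""] ++ [u])]
    rw [PySem.List.foldl_congr_mem _ _ (fun out u => out ++ [PySem.List.pyGetD ws i "", u]) _
        (fun _ _ _ => by simp)]
    rw [PySem.List.foldl_append_eq_flatMap]
    rfl

theorem pvRange_flatMap (ws : List String) :
    (List.range ws.length).flatMap (pvBlkN ws) = pvPairs ws := by
  induction ws with
  | nil => rfl
  | cons w t ih =>
    rw [List.length_cons, List.range_succ_eq_map, List.flatMap_cons, List.flatMap_map]
    have hhead : pvBlkN (w :: t) 0 = (t.filter (fun u => decide (pvHd w = pvHd u))).flatMap (fun u => [w, u]) := rfl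
    have htail : ∀ k, pvBlkN (w :: t) (Nat.succ k) = pvBlkN t k := by
      intro k
      simp [pvBlkN, List.drop_succ_cons]
    rw [hhead, List.flatMap_congr (fun k _ => htail k), ih, pvPairs]

theorem common_start_eq (ws : List String) : common_start ws = pvDd [] (pvPairs ws) := by
  unfold common_start
  simp only [pvOut_eq ws, pvRange_flatMap ws]
  exact PySem.List.foldl_pyRange_zero_pyGetD' (pvPairs ws) "" pvDstep []

-- ---- characterization of port B ----

-- the loop body of port B, named so the induction can speak about it
def pvStepB (full : List String) (st : List String × PySem.Set String × PySem.Set (Option Char))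
    (p : Int × String) : List String × PySem.Set String × PySem.Set (Option Char) :=
  let res := st.1
  let seen := st.2.1
  let done := st.2.2
  let w := p.2
  let c := PySem.Str.pyGet? w 0
  if PySem.Set.contains done c then st
  else
    let done' := PySem.Set.add done c
    let group := w :: (PySem.List.slice full (some (p.1 + 1)) none).filter
        (fun u => PySem.Str.pyGet? u 0 == c)
    if 1 < group.length then
      let rs := group.foldl (fun (rs : List String × PySem.Set String) u =>
        if PySem.Set.contains rs.2 u then rs
        else (rs.1 ++ [u], PySem.Set.add rs.2 u)) (res, seen)
      (rs.1, rs.2, done')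
    else (res, seen, done')

theorem pvPairFold (g : List String) : ∀ res : List String,
    g.foldl (fun (rs : List String × PySem.Set String) u =>
      if PySem.Set.contains rs.2 u then rs
      else (rs.1 ++ [u], PySem.Set.add rs.2 u)) (res, res) = (pvDd res g, pvDd res g) := by
  induction g with
  | nil => intro res; rfl
  | cons u t ih =>
    intro res
    simp only [List.foldl_cons, pvDd, pvDstep]
    by_cases hu : u ∈ res
    · rw [if_pos (by simpa [PySem.Set.contains] using hu), if_pos hu]
      exact ih res
    · rw [if_neg (by simpa [PySem.Set.contains] using hu), if_neg hu]
      have hadd : PySem.Set.add res u = res ++ [u] := by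
        simp [PySem.Set.add, PySem.Set.contains, hu]
      rw [hadd]
      exact ih (res ++ [u])

theorem pvContains_done (done : List (Option Char)) (c : Option Char) :
    PySem.Set.contains done c = decide (c ∈ done) := by
  simp [PySem.Set.contains]

theorem pvAltLoop (full : List String) : ∀ (t pre res : List String) (done : List (Option Char)),
    full = pre ++ t →
    ((PySem.List.enumerate t ((pre.length : Int))).foldl (pvStepB full) (res, res, done)).1
      = pvBS t res done := by
  intro t
  induction t with
  | nil => intro pre res done _; rfl
  | cons w t ih =>
    intro pre res done hfull
    rw [PySem.List.enumerate_cons, List.foldl_cons]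
    have hslice : (PySem.List.slice full (some ((pre.length : Int) + 1)) none) = t := by
      have h1 : ((pre.length : Int) + 1) = (((pre.length + 1 : Nat) : Int)) := by push_cast; ring_nf
      rw [h1, PySem.List.slice_from_natCast, hfull,
        show pre ++ w :: t = (pre ++ [w]) ++ t by simp,
        show pre.length + 1 = (pre ++ [w]).length by simp, List.drop_left]
    have hfilter : (fun u => pvHd u == pvHd w) = (fun u => decide (pvHd w = pvHd u)) := by
      funext u
      rw [Bool.beq_eq_decide_eq]
      exact decide_eq_decide.2 ⟨Eq.symm, Eq.symm⟩
    have hlen1 : (((pre ++ [w]).length : Int)) = (pre.length : Int) + 1 := by simp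
    have hrec := fun res' done' => ih (pre ++ [w]) res' done' (by simp [hfull])
    rw [show ((pre.length : Int) + 1) = (((pre ++ [w]).length : Int)) from hlen1.symm]
    rw [pvBS]
    by_cases hc : pvHd w ∈ done
    · have hstep : pvStepB full (res, res, done) ((pre.length : Int), w) = (res, res, done) := by
        unfold pvStepB
        simp only [pvHd_eq, pvContains_done]
        rw [if_pos (by simpa using hc)]
      rw [hstep, if_pos hc]
      exact hrec res done
    · rw [if_neg hc]
      rcases hms : t.filter (fun u => decide (pvHd w = pvHd u)) with _ | ⟨m, ms⟩
      · have hstep : pvStepB full (res, res, done) ((pre.length : Int), w)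
            = (res, res, done ++ [pvHd w]) := by
          unfold pvStepB
          simp only [pvHd_eq, pvContains_done, hslice, hfilter, hms]
          rw [if_neg (by simpa using hc)]
          simp [PySem.Set.add, PySem.Set.contains, hc]
        rw [hstep, if_pos rfl]
        exact hrec res (done ++ [pvHd w])
      · have hstep : pvStepB full (res, res, done) ((pre.length : Int), w)
            = (pvDd res (w :: m :: ms), pvDd res (w :: m :: ms), done ++ [pvHd w]) := by
          unfold pvStepB
          simp only [pvHd_eq, pvContains_done, hslice, hfilter, hms]
          rw [if_neg (by simpa using hc), if_pos (by simp), pvPairFold]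
          simp [PySem.Set.add, PySem.Set.contains, hc]
        rw [hstep, if_neg (by simp)]
        exact hrec (pvDd res (w :: m :: ms)) (done ++ [pvHd w])

theorem common_start_alt_eq (ws : List String) : common_start_alt ws = pvBS ws [] [] :=
  pvAltLoop ws ws [] [] [] rfl

-- ===== VERDICT (by name: the statement is the Claim_ definition above) =====
theorem common_start_spec : Claim_equal_common_start := by
  intro ws _ _
  unfold Spec_common_start
  rw [common_start_eq, common_start_alt_eq]
  exact pv_core ws [] [] (by simp)
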